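-- pv_equiv track=rewrite | github.com/iansedano/aoc | python/2022/day_17.py | find_repeating_pattern
-- ===== SOURCE A (Python) =====
-- import itertools
--
-- def find_repeating_pattern(seq, start_from=0, pattern_min=2, early_exit=False):
--     """
--     >>> find_repeating_pattern([1,2,1,2,1,2,1,2,1,2])
--     2
--     >>> find_repeating_pattern([1,2,3,1,2,3,1,2,3])
--     3
--     >>> find_repeating_pattern([1,2,3,4,5,1,2,3,4,5,1,2,3,4,5])
--     5
--     """
--     seq = tuple(seq[start_from:])
--     pattern_length = -1
--     max_len = len(seq) // 2
--     for window_size in range(max_len, pattern_min - 1, -1):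
--
--         chunks = [
--             seq[idx : idx + window_size]
--             for idx in range(0, len(seq), window_size)
--             if idx + window_size < len(seq) + 1
--         ]
--
--         if all(a == b for a, b in itertools.combinations(chunks, 2)):
--             if early_exit:
--                 return window_size
--             pattern_length = window_size
--
--     return pattern_length
-- ===== SOURCE B (Python) =====
-- # B: instead of A's all-pairs chunk comparison for every window size, test a window size by
-- # the single shifted scan s[i] == s[i - w] (each chunk against the previous one, element by
-- # element, short-circuiting at the first mismatch), and stop at the first valid size
-- # (scanning upward when the smallest pattern is wanted, downward for early_exit).
-- def find_repeating_pattern(seq, start_from=0, pattern_min=2, early_exit=False):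
--     s = list(seq[start_from:])
--     n = len(s)
--     max_len = n // 2
--     if early_exit:
--         sizes = range(max_len, pattern_min - 1, -1)
--     else:
--         sizes = range(pattern_min, max_len + 1)
--     for w in sizes:
--         k = n // w
--         if all(s[i] == s[i - w] for i in range(w, k * w)):
--             return w
--     return -1
-- ===== Notes on version B (the rewrite author's own statement) =====
-- stated objective: alternative
-- what changed: Each window size w is validated by one short-circuiting shifted scan s[i] == s[i-w] (each element against the one a full chunk earlier) instead of A's materialised chunk list compared over all itertools.combinations pairs, and the loop returns at the first valid size (upward scan for the smallest pattern, downward for early_exit) instead of A's scan over every size.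
-- outside the precondition, e.g. on find_repeating_pattern([1, 1, 1, 1], 0, 0, True): A returns 2, B returns 2
import Mathlib
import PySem

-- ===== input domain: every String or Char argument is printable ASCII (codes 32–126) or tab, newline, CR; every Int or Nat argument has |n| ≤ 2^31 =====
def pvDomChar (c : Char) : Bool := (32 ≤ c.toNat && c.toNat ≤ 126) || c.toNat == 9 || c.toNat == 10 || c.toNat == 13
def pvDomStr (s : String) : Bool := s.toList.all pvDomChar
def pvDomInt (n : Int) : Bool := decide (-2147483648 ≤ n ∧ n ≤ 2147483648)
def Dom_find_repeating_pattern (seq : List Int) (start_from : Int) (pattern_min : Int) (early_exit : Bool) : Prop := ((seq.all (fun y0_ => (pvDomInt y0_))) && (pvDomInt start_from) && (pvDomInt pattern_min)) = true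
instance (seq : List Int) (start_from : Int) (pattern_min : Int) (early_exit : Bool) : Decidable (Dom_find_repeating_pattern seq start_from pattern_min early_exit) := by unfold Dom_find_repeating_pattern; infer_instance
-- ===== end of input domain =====

-- B validates a window size w by one short-circuiting shifted scan s[i] == s[i-w] and returns
-- at the first valid size (upward scan, or downward with early_exit), instead of A's all-pairs
-- comparison of materialised chunks over every window size.

-- ===== PORT A =====
-- all(a == b for a, b in itertools.combinations(chunks, 2)); combinations always yields pairs,
-- so the wildcard match arm is never reached.
def pvAllPairsEq (l : List (List Int)) : Bool :=
  (PySem.List.combinations l 2).all (fun p =>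
    match p with
    | [a, b] => a == b
    | _ => true)

-- the chunks list comprehension
def pvChunksA (s : List Int) (w : Int) : List (List Int) :=
  ((PySem.List.pyRange 0 (s.length : Int) w).filter
    (fun idx => decide (idx + w < (s.length : Int) + 1))).map
    (fun idx => PySem.List.slice s (some idx) (some (idx + w)))

-- the for-loop over window sizes, with pattern_length accumulator and the early_exit return
def pvLoopA (s : List Int) (early : Bool) : List Int → Int → Int
  | [], acc => acc
  | w :: ws, acc =>
    if pvAllPairsEq (pvChunksA s w) then
      (if early then w else pvLoopA s early ws w)
    else pvLoopA s early ws acc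

def find_repeating_pattern (seq : List Int) (start_from : Int) (pattern_min : Int) (early_exit : Bool) : Int :=
  let s := PySem.List.slice seq (some start_from) none
  let max_len := PySem.Int.floordiv (s.length : Int) 2
  pvLoopA s early_exit (PySem.List.pyRange max_len (pattern_min - 1) (-1)) (-1)

-- ===== PORT B =====
-- the shifted scan: s[i] == s[i - w] for i in range(w, k*w) (all() short-circuits in Python;
-- the indices are always in range there, so pyGet? is some on both sides)
def pvValidB (s : List Int) (w : Int) : Bool :=
  let k := PySem.Int.floordiv (s.length : Int) w
  (PySem.List.pyRange w (k * w) 1).all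
    (fun i => PySem.List.pyGet? s i == PySem.List.pyGet? s (i - w))

-- return the first valid window size
def pvLoopB (s : List Int) : List Int → Int
  | [] => -1
  | w :: ws => if pvValidB s w then w else pvLoopB s ws

def find_repeating_pattern_alt (seq : List Int) (start_from : Int) (pattern_min : Int) (early_exit : Bool) : Int :=
  let s := PySem.List.slice seq (some start_from) none
  let max_len := PySem.Int.floordiv (s.length : Int) 2
  let sizes := if early_exit then PySem.List.pyRange max_len (pattern_min - 1) (-1)
               else PySem.List.pyRange pattern_min (max_len + 1) 1
  pvLoopB s sizes

-- ===== PRECONDITION & SPEC =====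
-- Pre_ excludes pattern_min ≤ 0: A's descending range then reaches window size 0 and raises
-- ValueError (range step mismatch at 0) unless early_exit returns first, and B divides the
-- sequence length by the window size, raising ZeroDivisionError at 0.
def Pre_find_repeating_pattern (seq : List Int) (start_from : Int) (pattern_min : Int) (early_exit : Bool) : Prop :=
  1 ≤ pattern_min
instance (seq : List Int) (start_from : Int) (pattern_min : Int) (early_exit : Bool) : Decidable (Pre_find_repeating_pattern seq start_from pattern_min early_exit) := by unfold Pre_find_repeating_pattern; infer_instance

def pvWitness_find_repeating_pattern : List Int × Int × Int × Bool := ([1, 2, 1, 2, 1, 2], 0, 2, false)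

def Spec_find_repeating_pattern (seq : List Int) (start_from : Int) (pattern_min : Int) (early_exit : Bool) (out : Int) : Prop := out = find_repeating_pattern_alt seq start_from pattern_min early_exit
instance (seq : List Int) (start_from : Int) (pattern_min : Int) (early_exit : Bool) (out : Int) : Decidable (Spec_find_repeating_pattern seq start_from pattern_min early_exit out) := by unfold Spec_find_repeating_pattern; infer_instance

-- ===== CLAIM (what is proved, stated in full; the proofs are below) =====
def Claim_equal_find_repeating_pattern : Prop := ∀ (seq : List Int) (start_from : Int) (pattern_min : Int) (early_exit : Bool), Dom_find_repeating_pattern seq start_from pattern_min early_exit → Pre_find_repeating_pattern seq start_from pattern_min early_exit → Spec_find_repeating_pattern seq start_from pattern_min early_exit (find_repeating_pattern seq start_from pattern_min early_exit)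

-- ===== LEMMAS AND PROOFS =====

-- all-pairs equality over a cons: the head is compared with everything, the tail recursively
theorem pvAllPairsEq_cons (c : List Int) (cs : List (List Int)) :
    pvAllPairsEq (c :: cs) = (cs.all (fun y => y == c) && pvAllPairsEq cs) := by
  unfold pvAllPairsEq
  rw [show (2:Nat) = 1 + 1 from rfl, PySem.List.combinations_cons_succ,
      PySem.List.combinations_one]
  simp only [List.all_append, List.all_map, Function.comp_def]
  congr 1
  simp [BEq.comm]

-- if everything in cs equals c, the all-pairs test on cs succeeds
theorem pvAllPairsEq_of_all_eq (c : List Int) (cs : List (List Int))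
    (h : cs.all (fun y => y == c) = true) : pvAllPairsEq cs = true := by
  induction cs with
  | nil => decide
  | cons d ds ih =>
    simp at h
    rw [pvAllPairsEq_cons]
    simp [ih (by simp; intro y hy; exact h.2 y hy)]
    intro y hy
    rw [h.1, h.2 y hy]

-- hence the all-pairs test is exactly "tail all equals head"
theorem pvAllPairsEq_eq (c : List Int) (cs : List (List Int)) :
    pvAllPairsEq (c :: cs) = cs.all (fun y => y == c) := by
  rw [pvAllPairsEq_cons]
  by_cases h : cs.all (fun y => y == c) = true
  · simp [h, pvAllPairsEq_of_all_eq c cs h]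
  · simp at h ⊢; tauto

theorem pvRangeFilterLt (M K : Nat) :
    (List.range M).filter (fun k => decide (k < K)) = List.range (min K M) := by
  induction M with
  | zero => simp
  | succ m ih =>
    rw [List.range_succ, List.filter_append, ih]
    by_cases h : m < K
    · have h1 : min K m = m := by omega
      simp [h, h1, List.range_succ]
    · have h1 : min K m = K := by omega
      have h2 : min K (m+1) = K := by omega
      simp [h, h1, h2]

-- the chunks comprehension keeps exactly the k = n / w complete chunks
theorem pvChunksA_eq (s : List Int) (W : Nat) (hW : 1 ≤ W) :
    pvChunksA s (W : Int) = (List.range (s.length / W)).map (fun j => (s.drop (j * W)).take W) := by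
  unfold pvChunksA
  rw [PySem.List.pyRange_of_pos _ _ (by exact_mod_cast hW)]
  rw [List.filter_map, List.map_map]
  rw [List.filter_congr (fun k _ => show ((fun idx => decide (idx + (W:Int) < (s.length:Int) + 1)) ∘ fun k : Nat => 0 + (W:Int) * k) k = decide (k < s.length / W) by
    simp only [Function.comp]
    refine (decide_eq_decide).mpr ?_
    rw [Nat.lt_iff_add_one_le, Nat.le_div_iff_mul_le (by omega)]
    constructor <;> intro h <;> nlinarith)]
  rw [pvRangeFilterLt]
  have hM : min (s.length / W) (if (0:Int) < (s.length:Int) then (((s.length:Int) - 0 + W - 1) / W).toNat else 0) = s.length / W := by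
    rcases Nat.eq_zero_or_pos s.length with h0 | h0
    · simp [h0]
    · have : ((s.length:Int) - 0 + W - 1) = ((s.length + W - 1 : Nat) : Int) := by omega
      rw [if_pos (by exact_mod_cast h0), this]
      rw [show ((s.length + W - 1 : Nat) : Int) / (W:Int) = ((s.length + W - 1) / W : Nat) from Int.ofNat_ediv_ofNat ..]
      simp only [Int.toNat_natCast]
      have := Nat.div_le_div_right (c := W) (show s.length ≤ s.length + W - 1 by omega)
      omega
  rw [hM]
  refine List.map_congr_left (fun j _ => ?_)
  simp only [Function.comp]
  rw [show (0 + (W:Int) * (j:Int)) = ((j * W : Nat) : Int) by push_cast; ring]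
  rw [PySem.List.slice_natCast_add]

-- chunks are equal iff they agree at every optional index
theorem pvChunkExt (s : List Int) (W a b : Nat) :
    (s.drop a).take W = (s.drop b).take W ↔ ∀ r < W, s[a + r]? = s[b + r]? := by
  constructor
  · intro h r hr
    have := congrArg (fun l => l[r]?) h
    simpa [List.getElem?_take, List.getElem?_drop, hr] using this
  · intro h
    apply List.ext_getElem?
    intro r
    by_cases hr : r < W
    · simpa [List.getElem?_take, List.getElem?_drop, hr] using h r hr
    · simp [hr]

-- every chunk equals its predecessor iff every chunk equals the first
theorem pvAdjIffHead (f : Nat → List Int) (m : Nat) :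
    (∀ t < m, f (t+1) = f t) ↔ (∀ t < m, f (t+1) = f 0) := by
  constructor
  · intro h t ht
    induction t with
    | zero => exact h 0 ht
    | succ q ih => rw [h (q+1) ht]; exact ih (by omega)
  · intro h t ht
    cases t with
    | zero => exact h 0 ht
    | succ q => rw [h (q+1) ht, h q (by omega)]

-- reindex a statement over [0, m*W) by quotient and remainder
theorem pvDivModIff (P : Nat → Prop) (m W : Nat) (hW : 1 ≤ W) :
    (∀ u < m * W, P u) ↔ ∀ t < m, ∀ r < W, P (t * W + r) := by
  constructor
  · intro h t ht r hr
    apply h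
    calc t * W + r < t * W + W := by omega
      _ = (t + 1) * W := by ring
      _ ≤ m * W := Nat.mul_le_mul_right _ (by omega)
  · intro h u hu
    have ht : u / W < m := (Nat.div_lt_iff_lt_mul (by omega)).mpr hu
    have := h (u / W) ht (u % W) (Nat.mod_lt _ (by omega))
    have heq : u / W * W + u % W = u := by
      rw [Nat.mul_comm]
      exact Nat.div_add_mod u W
    rwa [heq] at this

-- B's test is vacuously true when there is no complete chunk
theorem pvValidB_zero (s : List Int) (W : Nat) (hk : s.length / W = 0) :
    pvValidB s (W : Int) = true := by
  simp only [pvValidB]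
  rw [show PySem.Int.floordiv (s.length : Int) (W:Int) = ((s.length / W : Nat) : Int) from PySem.Int.floordiv_natCast ..]
  rw [hk, PySem.List.pyRange_one_eq_nil (by omega)]
  rfl

-- B's test, as a statement about optional indexing
theorem pvValidB_iff (s : List Int) (W m : Nat) (hk : s.length / W = m + 1) :
    pvValidB s (W : Int) = true ↔ ∀ u < m * W, s[W + u]? = s[u]? := by
  simp only [pvValidB]
  rw [show PySem.Int.floordiv (s.length : Int) (W:Int) = ((s.length / W : Nat) : Int) from PySem.Int.floordiv_natCast ..]
  rw [hk, List.all_eq_true]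
  have hmul : (((m + 1 : Nat) : Int)) * (W : Int) = ((m * W : Nat) : Int) + (W : Int) := by push_cast; ring
  constructor
  · intro h u hu
    have hmem : ((W : Int) + u) ∈ PySem.List.pyRange (W:Int) (((m+1:Nat):Int) * (W:Int)) 1 :=
      PySem.List.mem_pyRange_one.mpr ⟨by omega, by rw [hmul]; omega⟩
    have := h _ hmem
    simp only [show ((W:Int) + (u:Int)) - (W:Int) = (u:Int) by ring] at this
    rw [show ((W:Int) + (u:Int)) = ((W + u : Nat) : Int) by push_cast; ring] at this
    simp only [PySem.List.pyGet?_natCast, beq_iff_eq] at this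
    exact this
  · intro h i hi
    obtain ⟨h1, h2⟩ := PySem.List.mem_pyRange_one.mp hi
    rw [hmul] at h2
    obtain ⟨u, rfl⟩ : ∃ u : Nat, i = (W:Int) + u := ⟨(i - W).toNat, by omega⟩
    simp only [show ((W:Int) + (u:Int)) - (W:Int) = (u:Int) by ring]
    rw [show ((W:Int) + (u:Int)) = ((W + u : Nat) : Int) by push_cast; ring]
    simp only [PySem.List.pyGet?_natCast, beq_iff_eq]
    exact h u (by omega)

-- validity agrees between the two ports for positive window sizes
theorem pvValid_eq (s : List Int) (w : Int) (hw : 1 ≤ w) :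
    pvAllPairsEq (pvChunksA s w) = pvValidB s w := by
  obtain ⟨W, rfl⟩ : ∃ W : Nat, w = (W : Int) := ⟨w.toNat, (Int.toNat_of_nonneg (by omega)).symm⟩
  have hW : 1 ≤ W := by exact_mod_cast hw
  rw [pvChunksA_eq s W hW]
  rcases hk : s.length / W with _ | m
  · rw [pvValidB_zero s W hk]
    rfl
  · rw [List.range_succ_eq_map, List.map_cons, List.map_map, pvAllPairsEq_eq,
      Bool.eq_iff_iff, pvValidB_iff s W m hk, pvDivModIff _ m W hW]
    simp only [List.all_map, List.all_eq_true, List.mem_range, Function.comp_def, beq_iff_eq,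
      Nat.succ_eq_add_one]
    rw [← pvAdjIffHead (fun j => List.take W (List.drop (j * W) s)) m]
    refine forall_congr' fun t => imp_congr_right fun ht => ?_
    rw [pvChunkExt s W ((t+1) * W) (t * W)]
    refine forall_congr' fun r => imp_congr_right fun hr => ?_
    rw [show (t+1) * W + r = W + (t * W + r) by ring]

-- first-valid with a default, used to relate A's downward last-valid scan to B's upward scan
def pvFirstValidD (s : List Int) : List Int → Int → Int
  | [], acc => acc
  | w :: ws, acc => if pvValidB s w then w else pvFirstValidD s ws acc

theorem pvFirstValidD_append (s : List Int) (l : List Int) (w acc : Int) :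
    pvFirstValidD s (l ++ [w]) acc = pvFirstValidD s l (if pvValidB s w then w else acc) := by
  induction l with
  | nil => rfl
  | cons x xs ih => simp only [List.cons_append, pvFirstValidD, ih]

theorem pvLoopB_eq_firstValidD (s : List Int) (l : List Int) :
    pvLoopB s l = pvFirstValidD s l (-1) := by
  induction l with
  | nil => rfl
  | cons x xs ih => simp only [pvLoopB, pvFirstValidD, ih]

theorem pvLoopA_early (s : List Int) (ws : List Int)
    (h : ∀ w ∈ ws, pvAllPairsEq (pvChunksA s w) = pvValidB s w) :
    pvLoopA s true ws (-1) = pvLoopB s ws := by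
  induction ws with
  | nil => rfl
  | cons x xs ih =>
    simp only [pvLoopA, pvLoopB, h x (by simp)]
    split
    · rfl
    · exact ih (fun w hw => h w (by simp [hw]))

theorem pvLoopA_late (s : List Int) (ws : List Int) (acc : Int)
    (h : ∀ w ∈ ws, pvAllPairsEq (pvChunksA s w) = pvValidB s w) :
    pvLoopA s false ws acc = pvFirstValidD s ws.reverse acc := by
  induction ws generalizing acc with
  | nil => rfl
  | cons x xs ih =>
    simp only [pvLoopA, List.reverse_cons, h x (by simp), Bool.false_eq_true, if_false,
      pvFirstValidD_append]
    by_cases hx : pvValidB s x = true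
    · simp only [hx, if_true]
      exact ih x (fun w hw => h w (by simp [hw]))
    · simp only [hx, Bool.false_eq_true, if_false]
      exact ih acc (fun w hw => h w (by simp [hw]))

-- ===== VERDICT (by name: the statement is the Claim_ definition above) =====
theorem find_repeating_pattern_spec : Claim_equal_find_repeating_pattern := by
  intro seq start_from pattern_min early_exit _ hpre
  unfold Spec_find_repeating_pattern find_repeating_pattern find_repeating_pattern_alt
  have hpm : 1 ≤ pattern_min := hpre
  cases early_exit with
  | true =>
    simp only [if_true]
    exact pvLoopA_early _ _ (fun w hw => pvValid_eq _ w
      (by rcases PySem.List.mem_pyRange_neg_one.mp hw with ⟨h1, _⟩; omega))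
  | false =>
    simp only [Bool.false_eq_true, if_false]
    rw [pvLoopB_eq_firstValidD]
    rw [pvLoopA_late _ _ _ (fun w hw => pvValid_eq _ w
      (by rcases PySem.List.mem_pyRange_neg_one.mp hw with ⟨h1, _⟩; omega))]
    rw [PySem.List.pyRange_neg_one_eq_reverse, List.reverse_reverse]
    rw [show pattern_min - 1 + 1 = pattern_min by ring]
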